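-- pv_equiv track=rewrite | github.com/otmof-ops/briefkit | examples/gothic-novel/tools/typeset_paperback.py | parse_paragraphs_after_title
-- ===== SOURCE A (Python) =====
-- def _is_block_marker(ln):
--     """True if a line is a markdown block boundary (not just inline ** prefix)."""
--     if not ln:
--         return True
--     if ln.startswith("#") or ln == "---" or ln.startswith(">"):
--         return True
--     # Single * begins an italic scripture block; ** is bold prefix on a paragraph
--     if ln.startswith("*") and not ln.startswith("**"):
--         return True
--     return False
--
-- def parse_paragraphs_after_title(lines, start_idx, max_count=2):
--     """Collect up to max_count prose paragraphs from lines[start_idx]."""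
--     paragraphs = []
--     i = start_idx
--     while i < len(lines) and len(paragraphs) < max_count:
--         ln = lines[i].rstrip()
--         if not ln:
--             i += 1
--             continue
--         if _is_block_marker(ln):
--             break
--         buf = [ln]
--         i += 1
--         while i < len(lines):
--             nx = lines[i].rstrip()
--             if _is_block_marker(nx):
--                 break
--             buf.append(nx)
--             i += 1
--         paragraphs.append(" ".join(buf))
--     return paragraphs, i
-- ===== SOURCE B (Python) =====
-- def _is_block_marker(ln):
--     """True if a line is a markdown block boundary (not just inline ** prefix)."""
--     if not ln:
--         return True
--     if ln.startswith("#") or ln == "---" or ln.startswith(">"):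
--         return True
--     if ln.startswith("*") and not ln.startswith("**"):
--         return True
--     return False
--
-- def parse_paragraphs_after_title(lines, start_idx, max_count=2):
--     """Single linear pass with one running buffer instead of nested loops."""
--     if max_count <= 0:
--         return [], start_idx
--     paragraphs = []
--     buf = []
--     i = start_idx
--     n = len(lines)
--     while i < n:
--         ln = lines[i].rstrip()
--         if not ln:
--             if buf:
--                 paragraphs.append(" ".join(buf))
--                 buf = []
--                 if len(paragraphs) >= max_count:
--                     return paragraphs, i
--             i += 1
--         elif _is_block_marker(ln):
--             if buf:
--                 paragraphs.append(" ".join(buf))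
--             return paragraphs, i
--         else:
--             buf.append(ln)
--             i += 1
--     if buf:
--         paragraphs.append(" ".join(buf))
--     return paragraphs, i
-- ===== Notes on version B (the rewrite author's own statement) =====
-- stated objective: simpler
-- what changed: Replaced A's nested while-loops (outer paragraph loop with an inner line-collecting loop) by a single linear pass maintaining one running buffer that is flushed on blank lines, block markers and EOF, with an up-front max_count <= 0 guard.
import Mathlib
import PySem

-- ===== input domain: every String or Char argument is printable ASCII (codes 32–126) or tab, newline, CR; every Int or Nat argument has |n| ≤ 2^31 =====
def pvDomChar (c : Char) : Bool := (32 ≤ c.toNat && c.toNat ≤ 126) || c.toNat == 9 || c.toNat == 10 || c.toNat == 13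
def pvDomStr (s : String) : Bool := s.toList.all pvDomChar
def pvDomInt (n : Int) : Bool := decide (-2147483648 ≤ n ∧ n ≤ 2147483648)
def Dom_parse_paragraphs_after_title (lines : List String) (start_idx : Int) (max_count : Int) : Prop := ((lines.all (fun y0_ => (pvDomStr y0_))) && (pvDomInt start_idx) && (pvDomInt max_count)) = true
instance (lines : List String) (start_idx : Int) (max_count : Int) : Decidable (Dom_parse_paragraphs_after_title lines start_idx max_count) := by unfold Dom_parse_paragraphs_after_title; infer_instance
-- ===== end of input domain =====

-- B rewrites A's nested while-loops as one linear pass with a single running buffer (objective: simpler); same return value wherever A returns.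

-- ===== PORT A =====
-- shared helper: _is_block_marker (identical in Source A and Source B)
def is_block_marker (ln : String) : Bool :=
  if ln = "" then true
  else if PySem.Str.startswith ln "#" || ln = "---" || PySem.Str.startswith ln ">" then true
  else if PySem.Str.startswith ln "*" && !(PySem.Str.startswith ln "**") then true
  else false

-- A's inner while-loop: collect continuation lines into buf until a block marker / end.
-- The Nat argument is fuel for the structural recursion; the callers always pass at least
-- (len(lines) - i).toNat, which the loop (i strictly increasing) never exhausts.
def parseA_inner (lines : List String) : Nat → Int → List String → List String × Int
  | 0, i, buf => (buf, i)
  | fuel + 1, i, buf =>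
    if i < (lines.length : Int) then
      match PySem.List.pyGet? lines i with
      | none => (buf, i)  -- Python raises IndexError here; excluded by Pre_
      | some s =>
        let nx := PySem.Str.rstrip s
        if is_block_marker nx then (buf, i)
        else parseA_inner lines fuel (i + 1) (buf ++ [nx])
    else (buf, i)

-- A's outer while-loop
def parseA_outer (lines : List String) (max_count : Int) : Nat → Int → List String → List String × Int
  | 0, i, paras => (paras, i)
  | fuel + 1, i, paras =>
    if i < (lines.length : Int) ∧ (paras.length : Int) < max_count then
      match PySem.List.pyGet? lines i with
      | none => (paras, i)  -- Python raises IndexError here; excluded by Pre_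
      | some s =>
        let ln := PySem.Str.rstrip s
        if ln = "" then parseA_outer lines max_count fuel (i + 1) paras
        else if is_block_marker ln then (paras, i)
        else
          let r := parseA_inner lines fuel (i + 1) [ln]
          parseA_outer lines max_count fuel r.2 (paras ++ [PySem.Str.join " " r.1])
    else (paras, i)

def parse_paragraphs_after_title (lines : List String) (start_idx : Int) (max_count : Int) : List String × Int :=
  parseA_outer lines max_count ((lines.length : Int) - start_idx).toNat start_idx []

-- ===== PORT B =====
-- B's single loop: one running buffer, flushed on blank lines, block markers and EOF.
-- Same fuel device as above; i increases at every recursive call.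
def parseB_loop (lines : List String) (max_count : Int) : Nat → Int → List String → List String → List String × Int
  | 0, i, paras, buf => (if buf.isEmpty then paras else paras ++ [PySem.Str.join " " buf], i)
  | fuel + 1, i, paras, buf =>
    if i < (lines.length : Int) then
      match PySem.List.pyGet? lines i with
      | none => (if buf.isEmpty then paras else paras ++ [PySem.Str.join " " buf], i)  -- Python raises IndexError here; excluded by Pre_
      | some s =>
        let ln := PySem.Str.rstrip s
        if ln = "" then
          if buf.isEmpty then parseB_loop lines max_count fuel (i + 1) paras buf
          else
            let paras' := paras ++ [PySem.Str.join " " buf]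
            if max_count ≤ (paras'.length : Int) then (paras', i)
            else parseB_loop lines max_count fuel (i + 1) paras' []
        else if is_block_marker ln then
          (if buf.isEmpty then paras else paras ++ [PySem.Str.join " " buf], i)
        else parseB_loop lines max_count fuel (i + 1) paras (buf ++ [ln])
    else (if buf.isEmpty then paras else paras ++ [PySem.Str.join " " buf], i)

def parse_paragraphs_after_title_alt (lines : List String) (start_idx : Int) (max_count : Int) : List String × Int :=
  if max_count ≤ 0 then ([], start_idx)
  else parseB_loop lines max_count ((lines.length : Int) - start_idx).toNat start_idx [] []

-- ===== PRECONDITION & SPEC =====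
-- Pre_ excludes exactly the inputs where A raises IndexError: start_idx < -len(lines) with a
-- positive max_count (A's first lines[start_idx] is then out of range; with max_count ≤ 0 the loop never runs).
def Pre_parse_paragraphs_after_title (lines : List String) (start_idx : Int) (max_count : Int) : Prop :=
  -(lines.length : Int) ≤ start_idx ∨ max_count ≤ 0
instance (lines : List String) (start_idx : Int) (max_count : Int) : Decidable (Pre_parse_paragraphs_after_title lines start_idx max_count) := by unfold Pre_parse_paragraphs_after_title; infer_instance

def pvWitness_parse_paragraphs_after_title : List String × Int × Int := (["# T", "One two.", "three.", "", "Four.", "> q"], 1, 2)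

def Spec_parse_paragraphs_after_title (lines : List String) (start_idx : Int) (max_count : Int) (out : List String × Int) : Prop := out = parse_paragraphs_after_title_alt lines start_idx max_count
instance (lines : List String) (start_idx : Int) (max_count : Int) (out : List String × Int) : Decidable (Spec_parse_paragraphs_after_title lines start_idx max_count out) := by unfold Spec_parse_paragraphs_after_title; infer_instance

-- ===== CLAIM (what is proved, stated in full; the proofs are below) =====
def Claim_equal_parse_paragraphs_after_title : Prop := ∀ (lines : List String) (start_idx : Int) (max_count : Int), Dom_parse_paragraphs_after_title lines start_idx max_count → Pre_parse_paragraphs_after_title lines start_idx max_count → Spec_parse_paragraphs_after_title lines start_idx max_count (parse_paragraphs_after_title lines start_idx max_count)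

-- ===== LEMMAS AND PROOFS =====

-- the inner loop never moves i backwards
theorem parseA_inner_ge (lines : List String) :
    ∀ (fuel : Nat) (i : Int) (buf : List String), i ≤ (parseA_inner lines fuel i buf).2 := by
  intro fuel
  induction fuel with
  | zero => intro i buf; simp [parseA_inner]
  | succ fuel ih =>
    intro i buf
    rw [parseA_inner]
    by_cases hi : i < (lines.length : Int)
    · rw [if_pos hi]
      cases hg : PySem.List.pyGet? lines i with
      | none => simp
      | some s =>
        by_cases hm : is_block_marker (PySem.Str.rstrip s) = true
        · simp [hm]
        · simp only [if_neg hm]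
          have := ih (i + 1) (buf ++ [PySem.Str.rstrip s])
          omega
    · rw [if_neg hi]

-- one unit of fuel beyond the remaining length is never consumed (inner loop)
theorem parseA_inner_succ (lines : List String) :
    ∀ (fuel : Nat) (i : Int) (buf : List String),
      ((lines.length : Int) - i).toNat ≤ fuel →
      parseA_inner lines (fuel + 1) i buf = parseA_inner lines fuel i buf := by
  intro fuel
  induction fuel with
  | zero =>
    intro i buf hk
    have hi : ¬ i < (lines.length : Int) := by omega
    conv_lhs => rw [parseA_inner]
    rw [if_neg hi, parseA_inner]
  | succ fuel ih =>
    intro i buf hk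
    conv_lhs => rw [parseA_inner]
    conv_rhs => rw [parseA_inner]
    by_cases hi : i < (lines.length : Int)
    · rw [if_pos hi, if_pos hi]
      cases hg : PySem.List.pyGet? lines i with
      | none => rfl
      | some s =>
        by_cases hm : is_block_marker (PySem.Str.rstrip s) = true
        · simp [hm]
        · simp only [if_neg hm]
          exact ih (i + 1) (buf ++ [PySem.Str.rstrip s]) (by omega)
    · rw [if_neg hi, if_neg hi]

-- one unit of fuel beyond the remaining length is never consumed (outer loop)
theorem parseA_outer_succ (lines : List String) (max_count : Int) :
    ∀ (fuel : Nat) (i : Int) (paras : List String),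
      ((lines.length : Int) - i).toNat ≤ fuel →
      parseA_outer lines max_count (fuel + 1) i paras = parseA_outer lines max_count fuel i paras := by
  intro fuel
  induction fuel with
  | zero =>
    intro i paras hk
    have hi : ¬ i < (lines.length : Int) := by omega
    conv_lhs => rw [parseA_outer]
    rw [if_neg (by tauto : ¬ (i < (lines.length : Int) ∧ (paras.length : Int) < max_count)), parseA_outer]
  | succ fuel ih =>
    intro i paras hk
    conv_lhs => rw [parseA_outer]
    conv_rhs => rw [parseA_outer]
    by_cases hc : i < (lines.length : Int) ∧ (paras.length : Int) < max_count
    · rw [if_pos hc, if_pos hc]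
      cases hg : PySem.List.pyGet? lines i with
      | none => rfl
      | some s =>
        by_cases hln : PySem.Str.rstrip s = ""
        · simp only [if_pos hln]
          exact ih (i + 1) paras (by omega)
        · by_cases hm : is_block_marker (PySem.Str.rstrip s) = true
          · simp [hln, hm]
          · simp only [if_neg hln, if_neg hm]
            rw [parseA_inner_succ lines fuel (i + 1) [PySem.Str.rstrip s] (by omega)]
            have hge := parseA_inner_ge lines fuel (i + 1) [PySem.Str.rstrip s]
            exact ih _ _ (by omega)
    · rw [if_neg hc, if_neg hc]

-- A's outer loop returns immediately when its guard fails
theorem parseA_outer_exit (lines : List String) (max_count : Int) (fuel : Nat) (i : Int)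
    (paras : List String)
    (h : ¬ (i < (lines.length : Int) ∧ (paras.length : Int) < max_count)) :
    parseA_outer lines max_count fuel i paras = (paras, i) := by
  cases fuel with
  | zero => rw [parseA_outer]
  | succ fuel => rw [parseA_outer, if_neg h]

-- A's outer loop returns (paras, i) whenever position i stops it regardless of the count:
-- out of fetchable range (pyGet? = none) or a non-blank block-marker line
theorem parseA_outer_stop (lines : List String) (max_count : Int) (fuel : Nat) (i : Int)
    (paras : List String) (hi : i < (lines.length : Int))
    (hstop : ∀ s, PySem.List.pyGet? lines i = some s →
      ¬ PySem.Str.rstrip s = "" ∧ is_block_marker (PySem.Str.rstrip s) = true) :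
    parseA_outer lines max_count fuel i paras = (paras, i) := by
  by_cases hc : (paras.length : Int) < max_count
  · cases fuel with
    | zero => rw [parseA_outer]
    | succ fuel =>
      rw [parseA_outer, if_pos ⟨hi, hc⟩]
      cases hg : PySem.List.pyGet? lines i with
      | none => rfl
      | some s =>
        obtain ⟨h1, h2⟩ := hstop s hg
        simp [h1, h2]
  · exact parseA_outer_exit _ _ _ _ _ (by tauto)

-- Main invariant, by induction on the fuel k (both loops run on the same fuel; k is enough
-- whenever it bounds the remaining length): with fewer than max_count paragraphs collected,
-- (L0) A's outer loop from i equals B's loop with an empty buffer, and (L1) running A's inner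
-- loop from i on a non-empty buf and then A's outer loop on its result equals B's loop at i
-- carrying buf.
theorem parse_equiv_main (lines : List String) (max_count : Int) :
    ∀ (k : Nat) (i : Int) (paras buf : List String),
      ((lines.length : Int) - i).toNat ≤ k →
      (paras.length : Int) < max_count →
      (parseA_outer lines max_count k i paras = parseB_loop lines max_count k i paras []
       ∧ (buf ≠ [] →
          parseA_outer lines max_count k (parseA_inner lines k i buf).2
              (paras ++ [PySem.Str.join " " (parseA_inner lines k i buf).1])
            = parseB_loop lines max_count k i paras buf)) := by
  intro k
  induction k with
  | zero =>
    intro i paras buf hk hlt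
    refine ⟨?_, ?_⟩
    · rw [parseA_outer, parseB_loop]; simp
    · intro hbuf
      rw [parseA_inner, parseB_loop, parseA_outer]
      simp [List.isEmpty_iff, hbuf]
  | succ k ih =>
    intro i paras buf hk hlt
    by_cases hi : i < (lines.length : Int)
    case neg =>
      -- both loops exit at once
      have hB : ∀ p b, parseB_loop lines max_count (k + 1) i p b
          = (if b.isEmpty then p else p ++ [PySem.Str.join " " b], i) := by
        intro p b; rw [parseB_loop, if_neg hi]
      have hInner : parseA_inner lines (k + 1) i buf = (buf, i) := by
        rw [parseA_inner, if_neg hi]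
      refine ⟨?_, ?_⟩
      · rw [parseA_outer_exit _ _ _ _ _ (by tauto), hB]; simp
      · intro hbuf
        rw [hInner, hB]
        simp only [List.isEmpty_iff, if_neg hbuf]
        exact parseA_outer_exit _ _ _ _ _ (by tauto)
    case pos =>
      have hk' : ((lines.length : Int) - (i + 1)).toNat ≤ k := by omega
      cases hg : PySem.List.pyGet? lines i with
      | none =>
        -- Python raises here (outside Pre_); both ports stop at i, A after at most one more guard test
        have hA : ∀ p, parseA_outer lines max_count (k + 1) i p = (p, i) :=
          fun p => parseA_outer_stop _ _ _ _ _ hi (by intro s hs; rw [hg] at hs; cases hs)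
        have hInner : parseA_inner lines (k + 1) i buf = (buf, i) := by
          rw [parseA_inner, if_pos hi, hg]
        have hB : ∀ p b, parseB_loop lines max_count (k + 1) i p b
            = (if b.isEmpty then p else p ++ [PySem.Str.join " " b], i) := by
          intro p b; rw [parseB_loop, if_pos hi, hg]
        refine ⟨?_, ?_⟩
        · rw [hA, hB]; simp
        · intro hbuf
          rw [hInner, hB]
          simp only [List.isEmpty_iff, if_neg hbuf]
          exact hA _
      | some s =>
        by_cases hln : PySem.Str.rstrip s = ""
        case pos =>
          -- blank line: A skips it / ends the current paragraph; B flushes the buffer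
          have hmk : is_block_marker (PySem.Str.rstrip s) = true := by
            simp [is_block_marker, hln]
          have hA : ∀ p, (p.length : Int) < max_count →
              parseA_outer lines max_count (k + 1) i p
                = parseA_outer lines max_count k (i + 1) p := by
            intro p hp
            rw [parseA_outer, if_pos ⟨hi, hp⟩, hg]
            simp [hln]
          have hInner : parseA_inner lines (k + 1) i buf = (buf, i) := by
            rw [parseA_inner, if_pos hi, hg]
            simp [hmk]
          refine ⟨?_, ?_⟩
          · rw [hA paras hlt, parseB_loop, if_pos hi, hg]
            simp only [hln, List.isEmpty_nil, reduceIte]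
            exact (ih (i + 1) paras [] hk' hlt).1
          · intro hbuf
            rw [hInner, parseB_loop, if_pos hi, hg]
            simp only [hln, reduceIte, List.isEmpty_iff, if_neg hbuf]
            by_cases hc : max_count ≤ ((paras ++ [PySem.Str.join " " buf]).length : Int)
            · rw [if_pos hc]
              exact parseA_outer_exit _ _ _ _ _ (by omega)
            · rw [if_neg hc, hA _ (by omega)]
              exact (ih (i + 1) (paras ++ [PySem.Str.join " " buf]) [] hk' (by omega)).1
        case neg =>
          by_cases hmk : is_block_marker (PySem.Str.rstrip s) = true
          case pos =>
            -- non-blank block marker: both loops stop at i (B after flushing the buffer)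
            have hA : ∀ p, parseA_outer lines max_count (k + 1) i p = (p, i) :=
              fun p => parseA_outer_stop _ _ _ _ _ hi
                (by intro t ht; rw [hg] at ht; cases ht; exact ⟨hln, hmk⟩)
            have hInner : parseA_inner lines (k + 1) i buf = (buf, i) := by
              rw [parseA_inner, if_pos hi, hg]
              simp [hmk]
            have hB : ∀ p b, parseB_loop lines max_count (k + 1) i p b
                = (if b.isEmpty then p else p ++ [PySem.Str.join " " b], i) := by
              intro p b
              rw [parseB_loop, if_pos hi, hg]
              simp [hln, hmk]
            refine ⟨?_, ?_⟩
            · rw [hA, hB]; simp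
            · intro hbuf
              rw [hInner, hB]
              simp only [List.isEmpty_iff, if_neg hbuf]
              exact hA _
          case neg =>
            -- prose line: A starts/extends a paragraph, B extends its buffer; both advance to i+1
            have hInner : parseA_inner lines (k + 1) i buf
                = parseA_inner lines k (i + 1) (buf ++ [PySem.Str.rstrip s]) := by
              rw [parseA_inner, if_pos hi, hg]
              simp [hmk]
            refine ⟨?_, ?_⟩
            · rw [parseA_outer, if_pos ⟨hi, hlt⟩, hg, parseB_loop, if_pos hi, hg]
              simp only [if_neg hln, if_neg hmk, List.nil_append]
              exact (ih (i + 1) paras [PySem.Str.rstrip s] hk' hlt).2 (by simp)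
            · intro hbuf
              rw [hInner, parseB_loop, if_pos hi, hg]
              simp only [if_neg hln, if_neg hmk]
              have hge := parseA_inner_ge lines k (i + 1) (buf ++ [PySem.Str.rstrip s])
              rw [parseA_outer_succ lines max_count k _ _ (by omega)]
              exact (ih (i + 1) paras (buf ++ [PySem.Str.rstrip s]) hk' hlt).2 (by simp)

-- ===== VERDICT (by name: the statement is the Claim_ definition above) =====
theorem parse_paragraphs_after_title_spec : Claim_equal_parse_paragraphs_after_title := by
  intro lines start_idx max_count _hdom _hpre
  unfold Spec_parse_paragraphs_after_title parse_paragraphs_after_title parse_paragraphs_after_title_alt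
  by_cases hmc : max_count ≤ 0
  · rw [if_pos hmc]
    exact parseA_outer_exit _ _ _ _ _ (by simp; omega)
  · rw [if_neg hmc]
    exact (parse_equiv_main lines max_count ((lines.length : Int) - start_idx).toNat start_idx [] []
      (le_refl _) (by simp; omega)).1
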